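-- pv_equiv track=rewrite | github.com/uwuChenry/CS1301 | practiceProblems.py | dinnerTime
-- ===== SOURCE A (Python) =====
-- def dinnerTime(a):
--     a = int(a)
--     distance = [250, 460, 820, 870, 940]
--     shortest = abs(a-250) #placeholder
--     b = 0;
--     for i in range(1, 5):
--         temp = abs(distance[i] - a)
--         if temp <= shortest:
--             shortest = temp
--             b = i
--     match b:
--         case 0:
--             return "Sun, Sand, and Seafood"
--         case 1:
--             return "The Beachcomber's Bistro"
--         case 2:
--             return "Coastal Catch"
--         case 3:
--             return "Beachside Bonanza"
--         case 4:
--             return "Tidal Wave Tavern"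
--     pass
-- ===== SOURCE B (Python) =====
-- def dinnerTime(a):
--     a = int(a)
--     # distances are sorted: decide by midpoint thresholds; strict < routes
--     # exact-midpoint ties to the farther restaurant, matching A's <=.
--     if a < 355:
--         return "Sun, Sand, and Seafood"
--     elif a < 640:
--         return "The Beachcomber's Bistro"
--     elif a < 845:
--         return "Coastal Catch"
--     elif a < 905:
--         return "Beachside Bonanza"
--     else:
--         return "Tidal Wave Tavern"
-- ===== Notes on version B (the rewrite author's own statement) =====
-- stated objective: simpler
-- what changed: Replaces the min-tracking loop over all five distances with a direct threshold cascade on the midpoints between consecutive sorted distances (strict < sends exact midpoints to the farther index, matching A's <= tie-breaking).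
import Mathlib
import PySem

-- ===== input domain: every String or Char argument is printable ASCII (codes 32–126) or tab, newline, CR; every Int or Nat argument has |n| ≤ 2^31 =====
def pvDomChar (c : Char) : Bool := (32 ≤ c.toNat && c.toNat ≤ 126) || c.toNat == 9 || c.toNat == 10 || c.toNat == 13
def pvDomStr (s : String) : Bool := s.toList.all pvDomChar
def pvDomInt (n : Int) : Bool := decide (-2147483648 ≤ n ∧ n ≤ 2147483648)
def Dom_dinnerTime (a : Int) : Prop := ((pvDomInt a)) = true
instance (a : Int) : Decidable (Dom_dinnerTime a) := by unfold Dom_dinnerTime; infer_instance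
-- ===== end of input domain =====

-- B replaces A's min-tracking loop by a midpoint threshold cascade (simpler; same values).

-- ===== PORT A =====
def dinnerTime (a : Int) : String :=
  let distance : List Int := [250, 460, 820, 870, 940]
  let shortest : Int := |a - 250|
  let (_, b) := (PySem.List.pyRange 1 5 1).foldl
    (fun (st : Int × Int) (i : Int) =>
      let temp := |PySem.List.pyGetD distance i 0 - a|
      if temp ≤ st.1 then (temp, i) else st)
    (shortest, 0)
  match b with
  | 0 => "Sun, Sand, and Seafood"
  | 1 => "The Beachcomber's Bistro"
  | 2 => "Coastal Catch"
  | 3 => "Beachside Bonanza"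
  | 4 => "Tidal Wave Tavern"
  | _ => ""   -- Python falls through to 'pass' (returns None); unreachable since b ∈ 0..4

-- ===== PORT B =====
def dinnerTime_alt (a : Int) : String :=
  if a < 355 then "Sun, Sand, and Seafood"
  else if a < 640 then "The Beachcomber's Bistro"
  else if a < 845 then "Coastal Catch"
  else if a < 905 then "Beachside Bonanza"
  else "Tidal Wave Tavern"

-- ===== PRECONDITION & SPEC =====
def Spec_dinnerTime (a : Int) (out : String) : Prop := out = dinnerTime_alt a
instance (a : Int) (out : String) : Decidable (Spec_dinnerTime a out) := by unfold Spec_dinnerTime; infer_instance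

-- ===== CLAIM (what is proved, stated in full; the proofs are below) =====
def Claim_equal_dinnerTime : Prop := ∀ (a : Int), Dom_dinnerTime a → Spec_dinnerTime a (dinnerTime a)

-- ===== LEMMAS AND PROOFS =====

-- ===== VERDICT (by name: the statement is the Claim_ definition above) =====
theorem dinnerTime_spec : Claim_equal_dinnerTime := by
  intro a _
  show dinnerTime a = dinnerTime_alt a
  unfold dinnerTime dinnerTime_alt
  simp only [show PySem.List.pyRange 1 5 1 = [1,2,3,4] from by decide, List.foldl,
    show PySem.List.pyGetD [250,460,820,870,940] 1 0 = (460:Int) from by decide,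
    show PySem.List.pyGetD [250,460,820,870,940] 2 0 = (820:Int) from by decide,
    show PySem.List.pyGetD [250,460,820,870,940] 3 0 = (870:Int) from by decide,
    show PySem.List.pyGetD [250,460,820,870,940] 4 0 = (940:Int) from by decide,
    Int.abs_eq_natAbs]
  split_ifs <;> first | rfl | omega
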